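-- pv_equiv track=rewrite | github.com/ApilaashY/zones | business_lookup.py | format_company_info
-- ===== SOURCE A (Python) =====
-- def format_company_info(info: dict) -> str:
--     """Format company information into a readable string."""
--     # Define the order of fields for consistent output
--     field_order = [
--         'COMPANY NAME', 'STATUS', 'REGISTRY', 'ADDRESS', 'CITY', 'PROVINCE', 'POSTAL CODE',
--         'INCORPORATION DATE', 'BUSINESS NUMBER', 'CORPORATION NUMBER', 'JURISDICTION',
--         'BUSINESS TYPE', 'INDUSTRY', 'WEBSITE', 'EMAIL', 'PHONE', 'FAX', 'CATEGORY',
--         'SUBCATEGORY', 'PREVIOUSLY KNOWN AS', 'ADDITIONAL NAME', 'NOTES'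
--     ]
--
--     # Get all fields not in our predefined order
--     other_fields = [f for f in info.keys() if f not in field_order and not f.startswith('_')]
--
--     # Combine fields in order, then any remaining fields
--     all_fields = field_order + sorted(other_fields)
--
--     # Build the output
--     lines = []
--     for field in all_fields:
--         if field in info:
--             value = info[field]
--             if value:  # Only include non-empty values
--                 # Format the field name to be more readable
--                 formatted_field = field.title().replace('_', ' ')
--                 lines.append(f"{formatted_field}: {value}")
--
--     return '\n'.join(lines)
-- ===== SOURCE B (Python) =====
-- def format_company_info(info: dict) -> str:
--     """Format company information into a readable string."""
--     field_order = [
--         'COMPANY NAME', 'STATUS', 'REGISTRY', 'ADDRESS', 'CITY', 'PROVINCE', 'POSTAL CODE',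
--         'INCORPORATION DATE', 'BUSINESS NUMBER', 'CORPORATION NUMBER', 'JURISDICTION',
--         'BUSINESS TYPE', 'INDUSTRY', 'WEBSITE', 'EMAIL', 'PHONE', 'FAX', 'CATEGORY',
--         'SUBCATEGORY', 'PREVIOUSLY KNOWN AS', 'ADDITIONAL NAME', 'NOTES'
--     ]
--     # One pass over the dict: known fields go into a bucket array by position,
--     # unknown fields are collected and sorted by name afterwards.
--     index = {name: i for i, name in enumerate(field_order)}
--     known = [None] * len(field_order)
--     unknown = []
--     for name, value in info.items():
--         if not value:
--             continue
--         line = name.title().replace('_', ' ') + ': ' + str(value)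
--         i = index.get(name)
--         if i is not None:
--             known[i] = line
--         elif not name.startswith('_'):
--             unknown.append((name, line))
--     unknown.sort(key=lambda p: p[0])
--     return '\n'.join([l for l in known if l is not None] + [l for _, l in unknown])
-- ===== Notes on version B (the rewrite author's own statement) =====
-- stated objective: alternative
-- what changed: Instead of scanning field_order plus the sorted unknown keys and probing the dict for each, B makes one pass over info.items(), bucketing known fields into a position-indexed array via a precomputed name->index dict and collecting unknown fields to sort by name afterwards.
import Mathlib
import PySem

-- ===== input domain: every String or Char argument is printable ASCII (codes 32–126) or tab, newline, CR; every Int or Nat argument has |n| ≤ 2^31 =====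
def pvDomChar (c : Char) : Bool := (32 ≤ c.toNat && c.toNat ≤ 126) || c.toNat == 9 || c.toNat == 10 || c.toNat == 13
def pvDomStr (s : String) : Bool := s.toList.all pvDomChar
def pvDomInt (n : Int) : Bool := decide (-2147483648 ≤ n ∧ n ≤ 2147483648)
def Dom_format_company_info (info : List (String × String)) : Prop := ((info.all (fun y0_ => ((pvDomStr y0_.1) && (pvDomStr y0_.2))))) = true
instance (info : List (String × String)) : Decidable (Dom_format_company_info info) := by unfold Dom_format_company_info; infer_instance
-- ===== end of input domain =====

-- B reorganizes the computation: one pass over the dict items with a position-indexed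
-- bucket array for known fields and a sort of only the unknown fields (objective: alternative).

-- ===== PORT A =====
-- shared constant: the field_order list both Pythons contain verbatim
def pvFieldOrder : List String :=
  ["COMPANY NAME", "STATUS", "REGISTRY", "ADDRESS", "CITY", "PROVINCE", "POSTAL CODE",
   "INCORPORATION DATE", "BUSINESS NUMBER", "CORPORATION NUMBER", "JURISDICTION",
   "BUSINESS TYPE", "INDUSTRY", "WEBSITE", "EMAIL", "PHONE", "FAX", "CATEGORY",
   "SUBCATEGORY", "PREVIOUSLY KNOWN AS", "ADDITIONAL NAME", "NOTES"]

-- hand port of str.title() (no PySem primitive); exact on ASCII, where the cased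
-- characters are exactly the letters: a letter after a letter is lowercased, otherwise uppercased
def pvTitleChars : List Char → Bool → List Char
  | [], _ => []
  | c :: cs, prevCased =>
    if PySem.Chars.isalpha c then
      (if prevCased then PySem.Chars.lowerChar c else PySem.Chars.upperChar c) :: pvTitleChars cs true
    else c :: pvTitleChars cs false

-- shared helper: field.title().replace('_', ' ') + ': ' + value  (both Pythons contain this expression)
def pvFmt (name val : String) : String :=
  PySem.Str.replace (String.ofList (pvTitleChars name.toList false)) "_" " " ++ ": " ++ val

def format_company_info (info : List (String × String)) : String :=
  let d := PySem.Dict.ofList info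
  let other_fields := d.keys.filter (fun f => !(pvFieldOrder.contains f) && !(PySem.Str.startswith f "_"))
  let all_fields := pvFieldOrder ++ PySem.List.sorted other_fields (fun x => x) false
  let lines := all_fields.foldl (fun acc field =>
    match d.get? field with
    | some value => if value ≠ "" then acc ++ [pvFmt field value] else acc
    | none => acc) ([] : List String)
  PySem.Str.join "\n" lines

-- ===== PORT B =====
-- index = {name: i for i, name in enumerate(field_order)}
def pvIndex : PySem.Dict String Int :=
  (PySem.List.enumerate pvFieldOrder).foldl (fun ix p => ix.insert p.2 p.1) PySem.Dict.empty

def format_company_info_alt (info : List (String × String)) : String :=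
  let d := PySem.Dict.ofList info
  let st := d.items.foldl
    (fun (st : List (Option String) × List (String × String)) p =>
      if p.2 = "" then st
      else
        let line := pvFmt p.1 p.2
        match pvIndex.get? p.1 with
        | some i => (st.1.set i.toNat (some line), st.2)  -- known[i] = line; i is a valid nonnegative position by construction
        | none => if PySem.Str.startswith p.1 "_" then st else (st.1, st.2 ++ [(p.1, line)]))
    (List.replicate pvFieldOrder.length none, ([] : List (String × String)))
  PySem.Str.join "\n" (st.1.filterMap id ++ (PySem.List.sorted st.2 (fun q => q.1) false).map (fun q => q.2))

-- ===== PRECONDITION & SPEC =====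
def Spec_format_company_info (info : List (String × String)) (out : String) : Prop := out = format_company_info_alt info
instance (info : List (String × String)) (out : String) : Decidable (Spec_format_company_info info out) := by unfold Spec_format_company_info; infer_instance

-- ===== CLAIM (what is proved, stated in full; the proofs are below) =====
def Claim_equal_format_company_info : Prop := ∀ (info : List (String × String)), Dom_format_company_info info → Spec_format_company_info info (format_company_info info)

-- ===== LEMMAS AND PROOFS =====

theorem pvFieldOrder_nodup : pvFieldOrder.Nodup := by decide

theorem pvIndex_keys : pvIndex.keys = pvFieldOrder := by decide

theorem pvIndex_items_spec : ∀ p ∈ pvIndex.items,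
    p.2.toNat < pvFieldOrder.length ∧ pvFieldOrder.getD p.2.toNat "" = p.1 := by decide

theorem pvIndex_nodup_keys : pvIndex.keys.Nodup := by
  rw [pvIndex_keys]; exact pvFieldOrder_nodup

theorem pvIndex_get?_none_iff (k : String) : pvIndex.get? k = none ↔ k ∉ pvFieldOrder := by
  rw [PySem.Dict.get?_eq_none_iff_not_mem_keys, pvIndex_keys]

theorem pvIndex_get?_some {k : String} {i : Int} (h : pvIndex.get? k = some i) :
    i.toNat < pvFieldOrder.length ∧ pvFieldOrder.getD i.toNat "" = k := by
  have hm : (k, i) ∈ pvIndex.items :=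
    (PySem.Dict.get?_eq_some_iff_mem_items pvIndex k i pvIndex_nodup_keys).1 h
  exact pvIndex_items_spec (k, i) hm

theorem map_set_eq_map_update {α β : Type} [DecidableEq α] {l : List α} (hnd : l.Nodup)
    (h : α → β) {j : Nat} (hj : j < l.length) (x : β) :
    (l.map h).set j x = l.map (fun a => if a = l[j] then x else h a) := by
  apply List.ext_getElem (by simp)
  intro n h1 h2
  simp only [List.getElem_set, List.getElem_map]
  by_cases hn : n = j
  · subst hn; simp
  · have hnl : n < l.length := by simpa using h2
    have hne : l[n] ≠ l[j] := fun he => hn ((List.Nodup.getElem_inj_iff hnd).1 he)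
    simp only [hne, if_false, ite_eq_right_iff]
    intro hjn; exact absurd hjn.symm hn

theorem filterMap_id_map_ite {α β : Type} (l : List α) (P : α → Prop) [DecidablePred P] (g : α → β) :
    l.filterMap (fun a => if P a then some (g a) else none)
      = (l.filter (fun a => decide (P a))).map g := by
  induction l with
  | nil => rfl
  | cons a t ih =>
    by_cases hP : P a <;> simp [hP, ih]

-- the bucket-array pass of B, over a nodup list of keys, characterized field-by-field
theorem pvKnownFold (w g : String → String) :
    ∀ (ks : List String), ks.Nodup → ∀ (h : String → Option String),
    ks.foldl (fun kn k =>
      if w k = "" then kn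
      else match pvIndex.get? k with
        | some i => kn.set i.toNat (some (g k))
        | none => kn) (pvFieldOrder.map h)
    = pvFieldOrder.map (fun f => if f ∈ ks ∧ w f ≠ "" then some (g f) else h f) := by
  intro ks
  induction ks with
  | nil => intro _ h; simp
  | cons k t ih =>
    intro hnd h
    have hknt : k ∉ t := (List.nodup_cons.1 hnd).1
    have hndt : t.Nodup := (List.nodup_cons.1 hnd).2
    by_cases hw : w k = ""
    · simp only [List.foldl_cons, if_pos hw]
      rw [ih hndt h]
      refine List.map_congr_left (fun f _ => ?_)
      by_cases hfk : f = k
      · subst hfk; simp [hw, hknt]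
      · simp [List.mem_cons, hfk]
    · cases hidx : pvIndex.get? k with
      | none =>
        have hkF : k ∉ pvFieldOrder := (pvIndex_get?_none_iff k).1 hidx
        simp only [List.foldl_cons, if_neg hw, hidx]
        rw [ih hndt h]
        refine List.map_congr_left (fun f hf => ?_)
        have hfk : f ≠ k := fun he => hkF (he ▸ hf)
        simp [List.mem_cons, hfk]
      | some i =>
        obtain ⟨hi, hgetd⟩ := pvIndex_get?_some hidx
        have hik : pvFieldOrder[i.toNat] = k := by
          rw [← List.getD_eq_getElem pvFieldOrder "" hi, hgetd]
        simp only [List.foldl_cons, if_neg hw, hidx]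
        rw [map_set_eq_map_update pvFieldOrder_nodup h hi (some (g k)), hik,
          ih hndt (fun a => if a = k then some (g k) else h a)]
        refine List.map_congr_left (fun f _ => ?_)
        by_cases hfk : f = k
        · subst hfk; simp [hknt, hw]
        · simp [List.mem_cons, hfk]

theorem pvFoldlProdSplit {α β γ : Type} (f : β → α → β) (g : γ → α → γ) :
    ∀ (l : List α) (b : β) (c : γ),
    l.foldl (fun st x => (f st.1 x, g st.2 x)) (b, c) = (l.foldl f b, l.foldl g c) := by
  intro l
  induction l with
  | nil => intro b c; rfl
  | cons a t ih => intro b c; simp only [List.foldl_cons]; exact ih (f b a) (g c a)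

def pvStepA (kn : List (Option String)) (p : String × String) : List (Option String) :=
  if p.2 = "" then kn
  else match pvIndex.get? p.1 with
    | some i => kn.set i.toNat (some (pvFmt p.1 p.2))
    | none => kn

def pvStepB (un : List (String × String)) (p : String × String) : List (String × String) :=
  if p.2 = "" then un
  else match pvIndex.get? p.1 with
    | some _ => un
    | none => if PySem.Str.startswith p.1 "_" then un else un ++ [(p.1, pvFmt p.1 p.2)]

theorem format_company_info_spec : Claim_equal_format_company_info := by
  intro info _
  show format_company_info info = format_company_info_alt info
  simp only [format_company_info, format_company_info_alt]
  set d := PySem.Dict.ofList info with hd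
  have hnd : d.keys.Nodup := PySem.Dict.nodup_keys_ofList info
  set g : String → String := fun f => pvFmt f (d.getD f "") with hg
  -- A's loop body, expressed through getD
  have hbodyA : (fun (acc : List String) (field : String) =>
      match d.get? field with
      | some value => if value ≠ "" then acc ++ [pvFmt field value] else acc
      | none => acc)
      = fun acc field => if d.getD field "" ≠ "" then acc ++ [g field] else acc := by
    funext acc field
    cases hq : d.get? field with
    | none =>
      have h0 : d.getD field "" = "" := by rw [PySem.Dict.getD_eq_get?_getD, hq]; rfl
      simp [h0]
    | some v =>
      have h0 : d.getD field "" = v := by rw [PySem.Dict.getD_eq_get?_getD, hq]; rfl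
      simp [hg, h0]
  rw [hbodyA, PySem.List.foldl_append_ite]
  simp only [List.nil_append]
  rw [List.filter_append, List.map_append]
  -- B's pair step splits into two independent folds
  have hstep : (fun (st : List (Option String) × List (String × String)) (p : String × String) =>
      if p.2 = "" then st
      else
        let line := pvFmt p.1 p.2
        match pvIndex.get? p.1 with
        | some i => (st.1.set i.toNat (some line), st.2)
        | none => if PySem.Str.startswith p.1 "_" then st else (st.1, st.2 ++ [(p.1, line)]))
      = fun st p => (pvStepA st.1 p, pvStepB st.2 p) := by
    funext st p
    simp only [pvStepA, pvStepB]
    by_cases hp : p.2 = ""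
    · simp [hp]
    · simp only [if_neg hp]
      cases hq : pvIndex.get? p.1 with
      | some i => simp
      | none => simp only; split <;> simp
  rw [hstep, pvFoldlProdSplit]
  simp only
  rw [PySem.Dict.items_eq_map_keys d hnd "", List.foldl_map, List.foldl_map]
  -- known part: the bucket array
  rw [show (List.replicate pvFieldOrder.length (none : Option String))
        = pvFieldOrder.map (fun _ => none) from (List.map_const').symm]
  have hA : (fun (kn : List (Option String)) (k : String) => pvStepA kn (k, d.getD k ""))
      = fun kn k => if d.getD k "" = "" then kn
        else match pvIndex.get? k with
          | some i => kn.set i.toNat (some (g k))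
          | none => kn := by
    funext kn k; simp only [pvStepA, hg]
  rw [hA, pvKnownFold (fun k => d.getD k "") g d.keys hnd (fun _ => none)]
  rw [List.filterMap_map]
  rw [show (id ∘ fun f => if f ∈ d.keys ∧ d.getD f "" ≠ "" then some (g f) else none)
        = fun f => if f ∈ d.keys ∧ d.getD f "" ≠ "" then some (g f) else none from rfl]
  rw [filterMap_id_map_ite pvFieldOrder (fun f => f ∈ d.keys ∧ d.getD f "" ≠ "") g]
  have hfiltF : pvFieldOrder.filter (fun f => decide (f ∈ d.keys ∧ d.getD f "" ≠ ""))
      = pvFieldOrder.filter (fun f => decide (d.getD f "" ≠ "")) := by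
    refine List.filter_congr (fun f _ => ?_)
    by_cases hk : f ∈ d.keys
    · simp [hk]
    · have hc : d.contains f = false := by
        cases hcc : d.contains f
        · rfl
        · exact absurd ((PySem.Dict.contains_iff_mem_keys d f).1 hcc) hk
      have h0 : d.getD f "" = "" := PySem.Dict.getD_of_not_contains d "" hc
      simp [hk, h0]
  rw [hfiltF]
  -- unknown part: the collected list
  have hB : (fun (un : List (String × String)) (k : String) => pvStepB un (k, d.getD k ""))
      = fun un k => if d.getD k "" ≠ "" ∧ k ∉ pvFieldOrder ∧ ¬ PySem.Str.startswith k "_" = true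
          then un ++ [(k, g k)] else un := by
    funext un k
    simp only [pvStepB]
    by_cases hk : d.getD k "" = ""
    · simp [hk]
    · cases hq : pvIndex.get? k with
      | some i =>
        have hkF : k ∈ pvFieldOrder := by
          by_contra hnF
          rw [← pvIndex_get?_none_iff k] at hnF
          rw [hnF] at hq
          simp at hq
        simp [hk, hkF]
      | none =>
        have hkF : k ∉ pvFieldOrder := (pvIndex_get?_none_iff k).1 hq
        by_cases hsw : PySem.Chars.startswith k.toList ['_'] = true <;>
          simp [hk, hkF, hsw, hg]
  rw [hB, PySem.List.foldl_append_ite]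
  simp only [List.nil_append]
  -- the sort of the unknown pairs is A's alphabetical pass
  set otherA := d.keys.filter (fun f => !(pvFieldOrder.contains f) && !(PySem.Str.startswith f "_")) with hoA
  set sortedO := PySem.List.sorted otherA (fun x => x) false with hsO
  have hql : d.keys.filter (fun k =>
        decide (d.getD k "" ≠ "" ∧ k ∉ pvFieldOrder ∧ ¬ PySem.Str.startswith k "_" = true))
      = otherA.filter (fun f => decide (d.getD f "" ≠ "")) := by
    rw [hoA, List.filter_filter]
    refine List.filter_congr (fun f _ => ?_)
    by_cases h1 : d.getD f "" = "" <;> by_cases h2 : f ∈ pvFieldOrder <;>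
      by_cases h3 : PySem.Chars.startswith f.toList ['_'] = true <;>
        simp [h1, h2, h3]
  have hperm : ((sortedO.filter (fun f => decide (d.getD f "" ≠ ""))).map (fun k => (k, g k))).Perm
      ((d.keys.filter (fun k =>
        decide (d.getD k "" ≠ "" ∧ k ∉ pvFieldOrder ∧ ¬ PySem.Str.startswith k "_" = true))).map
        (fun k => (k, g k))) := by
    refine List.Perm.map _ ?_
    rw [hql, hsO]
    exact List.Perm.filter _ (PySem.List.sorted_perm otherA (fun x => x) false)
  have hnodupO : otherA.Nodup := hnd.filter _
  have hnodupS : sortedO.Nodup :=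
    ((PySem.List.sorted_perm otherA (fun x => x) false).symm).nodup hnodupO
  have hlt : sortedO.Pairwise (· < ·) := by
    have h1 := PySem.List.sorted_pairwise otherA (fun x => x)
    have h2 : sortedO.Pairwise (· ≠ ·) := hnodupS
    exact (h1.and h2).imp (fun h => lt_of_le_of_ne h.1 h.2)
  have hpw : ((sortedO.filter (fun f => decide (d.getD f "" ≠ ""))).map
      (fun k => (k, g k))).Pairwise (fun a b => a.1 < b.1) := by
    rw [List.pairwise_map]
    simpa using hlt.filter (fun f => decide (d.getD f "" ≠ ""))
  rw [PySem.List.sorted_eq_of_perm_of_pairwise_lt _ _ _ hperm hpw, List.map_map]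
  rfl
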